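-- pv_equiv track=rewrite | github.com/scottolmer/nfl-betting-system | scripts/convert_injury_file.py | classify_injury_type
-- ===== SOURCE A (Python) =====
-- def classify_injury_type(injury: str) -> str:
--     """Classify injury into categories"""
--     injury_lower = str(injury).lower()
--
--     if any(word in injury_lower for word in ['hamstring', 'groin', 'calf', 'quad']):
--         return 'soft_tissue'
--     elif any(word in injury_lower for word in ['ankle', 'foot', 'hand', 'finger']):
--         return 'bone'
--     elif 'concussion' in injury_lower:
--         return 'concussion'
--     elif any(word in injury_lower for word in ['knee', 'acl', 'mcl']):
--         return 'knee'
--     else: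
--         return 'other'
-- ===== SOURCE B (Python) =====
-- KEYWORD_PRIORITY = {
--     'hamstring': 0, 'groin': 0, 'calf': 0, 'quad': 0,
--     'ankle': 1, 'foot': 1, 'hand': 1, 'finger': 1,
--     'concussion': 2,
--     'knee': 3, 'acl': 3, 'mcl': 3,
-- }
-- CATEGORIES = ['soft_tissue', 'bone', 'concussion', 'knee']
--
--
-- def classify_injury_type(injury: str) -> str:
--     """Classify injury: one left-to-right scan over the string, keeping the
--     minimum priority of any keyword that starts at some position."""
--     s = str(injury).lower()
--     best = len(CATEGORIES)
--     for i in range(len(s)):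
--         for kw, pri in KEYWORD_PRIORITY.items():
--             if pri < best and s.startswith(kw, i):
--                 best = pri
--     return CATEGORIES[best] if best < len(CATEGORIES) else 'other'
-- ===== Notes on version B (the rewrite author's own statement) =====
-- stated objective: alternative
-- what changed: Replaces A's per-category substring (elif) chain by a single left-to-right scan over the lowercased string that, at each position, matches all keywords from a keyword-to-priority table and keeps the minimum matched priority, indexing the category list at the end.
import Mathlib
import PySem

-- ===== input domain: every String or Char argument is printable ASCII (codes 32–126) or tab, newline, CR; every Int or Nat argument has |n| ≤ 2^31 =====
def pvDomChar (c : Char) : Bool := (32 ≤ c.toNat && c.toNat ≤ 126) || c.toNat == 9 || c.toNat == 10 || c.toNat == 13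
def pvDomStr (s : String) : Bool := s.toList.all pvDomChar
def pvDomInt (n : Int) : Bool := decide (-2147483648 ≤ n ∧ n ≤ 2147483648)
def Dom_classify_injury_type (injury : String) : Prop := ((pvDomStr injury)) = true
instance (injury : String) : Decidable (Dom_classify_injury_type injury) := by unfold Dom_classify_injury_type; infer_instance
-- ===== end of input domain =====

-- B scans the lowercased string once, matching a keyword→priority table at each
-- position and keeping the minimum priority (alternative algorithm; same behaviour).

-- ===== PORT A =====
def classify_injury_type (injury : String) : String :=
  let injury_lower := PySem.Str.lower injury
  if ["hamstring", "groin", "calf", "quad"].any (fun word => PySem.Str.isIn word injury_lower) then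
    "soft_tissue"
  else if ["ankle", "foot", "hand", "finger"].any (fun word => PySem.Str.isIn word injury_lower) then
    "bone"
  else if PySem.Str.isIn "concussion" injury_lower then
    "concussion"
  else if ["knee", "acl", "mcl"].any (fun word => PySem.Str.isIn word injury_lower) then
    "knee"
  else
    "other"

-- ===== PORT B =====
-- KEYWORD_PRIORITY dict (insertion order) from Source B, keys as char lists
def pvKeywordPriority : List (List Char × Nat) :=
  [ ("hamstring".toList, 0), ("groin".toList, 0), ("calf".toList, 0), ("quad".toList, 0),
    ("ankle".toList, 1), ("foot".toList, 1), ("hand".toList, 1), ("finger".toList, 1),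
    ("concussion".toList, 2),
    ("knee".toList, 3), ("acl".toList, 3), ("mcl".toList, 3) ]

def pvCategories : List String := ["soft_tissue", "bone", "concussion", "knee"]

-- the nested 'for i in range(len(s)) / for kw,pri in …' scan, as two folds;
-- s.startswith(kw, i) is Chars.startswith on the i-th suffix (exact for 0 ≤ i ≤ len)
def pvScan (s : List Char) : Nat :=
  (List.range s.length).foldl
    (fun best i =>
      pvKeywordPriority.foldl
        (fun best kp =>
          if kp.2 < best && PySem.Chars.startswith (s.drop i) kp.1 then kp.2 else best)
        best)
    pvCategories.length

def classify_injury_type_alt (injury : String) : String :=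
  let s := (PySem.Str.lower injury).toList
  let best := pvScan s
  if best < pvCategories.length then pvCategories.getD best "other" else "other"

-- ===== PRECONDITION & SPEC =====
def Spec_classify_injury_type (injury : String) (out : String) : Prop := out = classify_injury_type_alt injury
instance (injury : String) (out : String) : Decidable (Spec_classify_injury_type injury out) := by unfold Spec_classify_injury_type; infer_instance

-- ===== CLAIM (what is proved, stated in full; the proofs are below) =====
def Claim_equal_classify_injury_type : Prop := ∀ (injury : String), Dom_classify_injury_type injury → Spec_classify_injury_type injury (classify_injury_type injury)

-- ===== LEMMAS AND PROOFS =====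

-- a keyword of priority p occurs somewhere in s (as a prefix of some suffix i < len)
def pvMatched (s : List Char) (p : Nat) : Prop :=
  ∃ kp ∈ pvKeywordPriority, kp.2 = p ∧ ∃ i < s.length, PySem.Chars.startswith (s.drop i) kp.1 = true

-- generic spec of a min-tracking foldl: result ≤ init, result is the init or a matched value,
-- and result is ≤ every matched value
theorem pvFoldlMin {ι : Type} (h : Nat → ι → Nat) (M : ι → Nat → Prop)
    (Hstep : ∀ b i, h b i ≤ b ∧ (h b i = b ∨ M i (h b i)) ∧ ∀ p, M i p → h b i ≤ p)
    (xs : List ι) : ∀ (b : Nat),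
    xs.foldl h b ≤ b ∧ (xs.foldl h b = b ∨ ∃ i ∈ xs, M i (xs.foldl h b)) ∧
      ∀ i ∈ xs, ∀ p, M i p → xs.foldl h b ≤ p := by
  induction xs with
  | nil => intro b; simp
  | cons x xs ih =>
    intro b
    obtain ⟨h1, h2, h3⟩ := ih (h b x)
    obtain ⟨s1, s2, s3⟩ := Hstep b x
    refine ⟨h1.trans s1, ?_, ?_⟩
    · rcases h2 with h2 | ⟨i, hi, hM⟩
      · rcases s2 with s2 | s2
        · exact Or.inl (h2.trans s2)
        · exact Or.inr ⟨x, by simp, h2 ▸ s2⟩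
      · exact Or.inr ⟨i, by simp [hi], hM⟩
    · intro i hi p hp
      rcases List.mem_cons.mp hi with rfl | hi
      · exact h1.trans (s3 p hp)
      · exact h3 i hi p hp

-- the inner (keyword) fold satisfies the step hypothesis of pvFoldlMin
theorem pvInnerStep (s : List Char) (i : Nat) (b : Nat) (kp : List Char × Nat) :
    (if kp.2 < b && PySem.Chars.startswith (s.drop i) kp.1 then kp.2 else b) ≤ b ∧
    ((if kp.2 < b && PySem.Chars.startswith (s.drop i) kp.1 then kp.2 else b) = b ∨
      (PySem.Chars.startswith (s.drop i) kp.1 = true ∧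
        kp.2 = (if kp.2 < b && PySem.Chars.startswith (s.drop i) kp.1 then kp.2 else b))) ∧
    ∀ p, (PySem.Chars.startswith (s.drop i) kp.1 = true ∧ kp.2 = p) →
      (if kp.2 < b && PySem.Chars.startswith (s.drop i) kp.1 then kp.2 else b) ≤ p := by
  split_ifs with hc
  · rw [Bool.and_eq_true, decide_eq_true_iff] at hc
    exact ⟨Nat.le_of_lt hc.1, Or.inr ⟨hc.2, rfl⟩, fun p hp => hp.2 ▸ le_refl _⟩
  · refine ⟨le_refl b, Or.inl rfl, ?_⟩
    rintro p ⟨hsw, rfl⟩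
    by_contra hlt
    exact hc (by simp [hsw]; omega)

theorem pvScan_le_and (s : List Char) :
    (pvScan s = 4 ∨ pvMatched s (pvScan s)) ∧ ∀ p, pvMatched s p → pvScan s ≤ p := by
  have main := pvFoldlMin
    (fun best i => pvKeywordPriority.foldl
      (fun best kp => if kp.2 < best && PySem.Chars.startswith (s.drop i) kp.1 then kp.2 else best) best)
    (fun i v => ∃ kp ∈ pvKeywordPriority, PySem.Chars.startswith (s.drop i) kp.1 = true ∧ kp.2 = v)
    (by
      intro b i
      have inner := pvFoldlMin
        (fun best kp => if kp.2 < best && PySem.Chars.startswith (s.drop i) kp.1 then kp.2 else best)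
        (fun kp v => PySem.Chars.startswith (s.drop i) kp.1 = true ∧ kp.2 = v)
        (fun b kp => pvInnerStep s i b kp) pvKeywordPriority b
      obtain ⟨i1, i2, i3⟩ := inner
      exact ⟨i1, i2.imp id (fun ⟨kp, hm, h⟩ => ⟨kp, hm, h⟩),
        fun v ⟨kp, hm, hsw, hv⟩ => i3 kp hm v ⟨hsw, hv⟩⟩)
    (List.range s.length) pvCategories.length
  obtain ⟨m1, m2, m3⟩ := main
  constructor
  · rcases m2 with m2 | ⟨i, hi, kp, hm, hsw, hv⟩
    · exact Or.inl m2
    · exact Or.inr ⟨kp, hm, hv, i, List.mem_range.mp hi, hsw⟩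
  · rintro p ⟨kp, hm, hp, i, hilt, hsw⟩
    exact m3 i (List.mem_range.mpr hilt) p ⟨kp, hm, hsw, hp⟩

theorem pvKw_ne_nil : ∀ kp ∈ pvKeywordPriority, kp.1 ≠ [] := by decide

theorem pvMatched_iff_isIn (s : List Char) (p : Nat) :
    pvMatched s p ↔ ∃ kp ∈ pvKeywordPriority, kp.2 = p ∧ PySem.Chars.isIn kp.1 s = true := by
  unfold pvMatched
  refine ⟨fun ⟨kp, hm, hp, i, hilt, hsw⟩ => ⟨kp, hm, hp, ?_⟩,
          fun ⟨kp, hm, hp, hin⟩ => ⟨kp, hm, hp, ?_⟩⟩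
  · exact (PySem.Chars.exists_prefix_drop_iff_isIn _ _).mp
      ⟨i, (PySem.Chars.startswith_iff _ _).mp hsw⟩
  · obtain ⟨j, hj⟩ := (PySem.Chars.exists_prefix_drop_iff_isIn _ _).mpr hin
    by_cases hjl : j < s.length
    · exact ⟨j, hjl, (PySem.Chars.startswith_iff _ _).mpr hj⟩
    · exfalso
      apply pvKw_ne_nil kp hm
      have hnil : s.drop j = [] := List.drop_eq_nil_of_le (Nat.le_of_not_lt hjl)
      rw [hnil] at hj
      exact List.prefix_nil.mp hj


theorem pvScan_cases (s : List Char) :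
    pvScan s =
      (if PySem.Chars.isIn "hamstring".toList s || PySem.Chars.isIn "groin".toList s ||
          PySem.Chars.isIn "calf".toList s || PySem.Chars.isIn "quad".toList s then 0
       else if PySem.Chars.isIn "ankle".toList s || PySem.Chars.isIn "foot".toList s ||
          PySem.Chars.isIn "hand".toList s || PySem.Chars.isIn "finger".toList s then 1
       else if PySem.Chars.isIn "concussion".toList s then 2
       else if PySem.Chars.isIn "knee".toList s || PySem.Chars.isIn "acl".toList s ||
          PySem.Chars.isIn "mcl".toList s then 3
       else 4) := by
  obtain ⟨hdisj, hmin⟩ := pvScan_le_and s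
  have occ0 : pvMatched s 0 ↔ (PySem.Chars.isIn "hamstring".toList s = true ∨ PySem.Chars.isIn "groin".toList s = true ∨ PySem.Chars.isIn "calf".toList s = true ∨ PySem.Chars.isIn "quad".toList s = true) := by
    rw [pvMatched_iff_isIn]; simp [pvKeywordPriority]
  have occ1 : pvMatched s 1 ↔ (PySem.Chars.isIn "ankle".toList s = true ∨ PySem.Chars.isIn "foot".toList s = true ∨ PySem.Chars.isIn "hand".toList s = true ∨ PySem.Chars.isIn "finger".toList s = true) := by
    rw [pvMatched_iff_isIn]; simp [pvKeywordPriority]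
  have occ2 : pvMatched s 2 ↔ PySem.Chars.isIn "concussion".toList s = true := by
    rw [pvMatched_iff_isIn]; simp [pvKeywordPriority]
  have occ3 : pvMatched s 3 ↔ (PySem.Chars.isIn "knee".toList s = true ∨ PySem.Chars.isIn "acl".toList s = true ∨ PySem.Chars.isIn "mcl".toList s = true) := by
    rw [pvMatched_iff_isIn]; simp [pvKeywordPriority]
  have hp4 : ∀ p, pvMatched s p → p < 4 := by
    rintro p ⟨kp, hm, hp, -⟩
    subst hp
    fin_cases hm <;> norm_num
  have hMat : pvScan s ≠ 4 → pvMatched s (pvScan s) := fun h4 => hdisj.resolve_left h4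
  split_ifs with h0 h1 h2 h3
  · simp only [Bool.or_eq_true, or_assoc] at h0
    exact Nat.le_zero.mp (hmin 0 (occ0.mpr h0))
  · simp only [Bool.or_eq_true, or_assoc] at h0 h1
    have hle := hmin 1 (occ1.mpr h1)
    have hne : pvScan s ≠ 0 := fun h => h0 (occ0.mp (h ▸ hMat (by omega)))
    omega
  · simp only [Bool.or_eq_true, or_assoc] at h0 h1
    have hle := hmin 2 (occ2.mpr h2)
    have hne0 : pvScan s ≠ 0 := fun h => h0 (occ0.mp (h ▸ hMat (by omega)))
    have hne1 : pvScan s ≠ 1 := fun h => h1 (occ1.mp (h ▸ hMat (by omega)))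
    omega
  · simp only [Bool.or_eq_true, or_assoc] at h0 h1 h3
    have hle := hmin 3 (occ3.mpr h3)
    have hne0 : pvScan s ≠ 0 := fun h => h0 (occ0.mp (h ▸ hMat (by omega)))
    have hne1 : pvScan s ≠ 1 := fun h => h1 (occ1.mp (h ▸ hMat (by omega)))
    have hne2 : pvScan s ≠ 2 := fun h => h2 (occ2.mp (h ▸ hMat (by omega)))
    omega
  · simp only [Bool.or_eq_true, or_assoc] at h0 h1 h3
    by_contra h4
    have hM := hMat h4
    have hlt := hp4 _ hM
    have hcase : pvScan s = 0 ∨ pvScan s = 1 ∨ pvScan s = 2 ∨ pvScan s = 3 := by omega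
    rcases hcase with h | h | h | h
    · exact h0 (occ0.mp (h ▸ hM))
    · exact h1 (occ1.mp (h ▸ hM))
    · exact h2 (occ2.mp (h ▸ hM))
    · exact h3 (occ3.mp (h ▸ hM))

-- ===== VERDICT (by name: the statement is the Claim_ definition above) =====
theorem classify_injury_type_spec : Claim_equal_classify_injury_type := by
  intro injury _
  unfold Spec_classify_injury_type classify_injury_type classify_injury_type_alt
  simp only [List.any_cons, List.any_nil, Bool.or_false, PySem.Str.isIn_eq, pvScan_cases,
    pvCategories]
  split_ifs <;> simp_all
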